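-- pv_equiv track=rewrite | github.com/ramarora09/Carrer-Baba-Ai | career_baba_ai/utils/recommendation.py | recommend_skills
-- ===== SOURCE A (Python) =====
-- def recommend_skills(missing_skills):
--
--     # Priority mapping (core skills first 🔥)
--     PRIORITY_SKILLS = [
--         "python", "java", "javascript",
--         "sql", "dsa", "machine learning",
--         "react", "node", "docker", "aws"
--     ]
--
--     recommendations = []
--
--     # Step 1: High priority skills first
--     for skill in PRIORITY_SKILLS:
--         if skill in missing_skills:
--             recommendations.append(skill)
--
--     # Step 2: Add remaining skills
--     for skill in missing_skills:
--         if skill not in recommendations: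
--             recommendations.append(skill)
--
--     # Step 3: Limit output
--     return recommendations[:5]
-- ===== SOURCE B (Python) =====
-- def recommend_skills(missing_skills):
--     PRIORITY_SKILLS = [
--         "python", "java", "javascript",
--         "sql", "dsa", "machine learning",
--         "react", "node", "docker", "aws"
--     ]
--     rank = {s: i for i, s in enumerate(PRIORITY_SKILLS)}
--     fallback = len(PRIORITY_SKILLS)
--     buckets = [[] for _ in range(fallback + 1)]
--     for s in dict.fromkeys(missing_skills):
--         buckets[rank.get(s, fallback)].append(s)
--     return [s for bucket in buckets for s in bucket][:5]
-- ===== Notes on version B (the rewrite author's own statement) =====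
-- stated objective: faster
-- what changed: Replaces A's two membership-scanning loops (priority list scanned against missing_skills, then missing_skills scanned against the growing recommendations list) by a rank dictionary, an ordered dedup via dict.fromkeys, and a single bucket pass (counting sort by priority rank).
import Mathlib
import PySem

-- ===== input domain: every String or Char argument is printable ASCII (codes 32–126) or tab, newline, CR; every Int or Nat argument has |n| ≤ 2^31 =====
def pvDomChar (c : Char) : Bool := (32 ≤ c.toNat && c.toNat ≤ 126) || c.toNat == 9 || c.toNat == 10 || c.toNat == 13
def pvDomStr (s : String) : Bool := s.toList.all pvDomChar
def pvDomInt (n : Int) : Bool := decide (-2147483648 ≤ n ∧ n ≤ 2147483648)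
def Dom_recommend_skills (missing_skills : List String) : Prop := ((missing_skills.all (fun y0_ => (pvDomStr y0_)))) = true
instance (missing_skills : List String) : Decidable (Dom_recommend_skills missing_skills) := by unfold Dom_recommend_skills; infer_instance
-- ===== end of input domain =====

-- B replaces A's quadratic membership scans by a rank dictionary, an ordered dedup and one bucket
-- pass (a counting sort by priority rank); objective: faster (one pass, O(1) lookups).


-- ===== PORT A =====
def prioritySkills : List String :=
  ["python", "java", "javascript",
   "sql", "dsa", "machine learning",
   "react", "node", "docker", "aws"]

def recommend_skills (missing_skills : List String) : List String :=
  -- Step 1: high priority skills first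
  let recommendations :=
    prioritySkills.foldl
      (fun acc skill => if skill ∈ missing_skills then acc ++ [skill] else acc) []
  -- Step 2: add remaining skills
  let recommendations :=
    missing_skills.foldl
      (fun acc skill => if skill ∈ acc then acc else acc ++ [skill]) recommendations
  -- Step 3: recommendations[:5]
  PySem.List.slice recommendations none (some 5)

-- ===== PORT B =====
-- rank = {s: i for i, s in enumerate(PRIORITY_SKILLS)}
def rankTable : PySem.Dict String Int :=
  (PySem.List.enumerate prioritySkills 0).foldl
    (fun d p => d.insert p.2 p.1) PySem.Dict.empty

-- buckets[i].append(s); exact here because the index rank.get(s, fallback) always lies in range 0..10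
def bucketAppend (buckets : List (List String)) (i : Int) (s : String) : List (List String) :=
  PySem.List.pySetD buckets i (PySem.List.pyGetD buckets i [] ++ [s])

def recommend_skills_alt (missing_skills : List String) : List String :=
  let fallback : Int := (prioritySkills.length : Int)
  let buckets0 : List (List String) :=
    (List.range (prioritySkills.length + 1)).map (fun _ => ([] : List String))
  let buckets :=
    (PySem.List.dedup missing_skills).foldl
      (fun bs s => bucketAppend bs (rankTable.getD s fallback) s) buckets0
  PySem.List.slice (buckets.flatMap (fun bucket => bucket)) none (some 5)

-- ===== PRECONDITION & SPEC =====
def Spec_recommend_skills (missing_skills : List String) (out : List String) : Prop := out = recommend_skills_alt missing_skills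
instance (missing_skills : List String) (out : List String) : Decidable (Spec_recommend_skills missing_skills out) := by unfold Spec_recommend_skills; infer_instance

-- ===== CLAIM (what is proved, stated in full; the proofs are below) =====
def Claim_equal_recommend_skills : Prop := ∀ (missing_skills : List String), Dom_recommend_skills missing_skills → Spec_recommend_skills missing_skills (recommend_skills missing_skills)

-- ===== LEMMAS AND PROOFS =====

/-- first-occurrence dedup of `r`, skipping anything already in `seen` (proof-only helper). -/
def ddAux (seen : List String) : List String → List String
  | [] => []
  | s :: r => if s ∈ seen then ddAux seen r else s :: ddAux (seen ++ [s]) r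

lemma foldl_dd (r : List String) : ∀ (acc : List String),
    r.foldl (fun a s => if s ∈ a then a else a ++ [s]) acc = acc ++ ddAux acc r := by
  induction r with
  | nil => intro acc; simp [ddAux]
  | cons s r ih =>
    intro acc
    simp only [List.foldl_cons, ddAux]
    by_cases h : s ∈ acc
    · simp [h, ih]
    · simp [h, ih]

lemma ddAux_congr (r : List String) : ∀ (s1 s2 : List String),
    (∀ x ∈ r, (x ∈ s1 ↔ x ∈ s2)) → ddAux s1 r = ddAux s2 r := by
  induction r with
  | nil => intro _ _ _; simp [ddAux]
  | cons s r ih =>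
    intro s1 s2 h
    have hs := h s (by simp)
    simp only [ddAux]
    by_cases h1 : s ∈ s1
    · rw [if_pos h1, if_pos (hs.mp h1)]
      exact ih s1 s2 (fun x hx => h x (by simp [hx]))
    · rw [if_neg h1, if_neg (fun h2 => h1 (hs.mpr h2))]
      congr 1
      exact ih (s1 ++ [s]) (s2 ++ [s]) (fun x hx => by
        simp only [List.mem_append, List.mem_singleton]
        constructor
        · rintro (h' | h')
          · exact Or.inl ((h x (by simp [hx])).mp h')
          · exact Or.inr h'
        · rintro (h' | h')
          · exact Or.inl ((h x (by simp [hx])).mpr h')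
          · exact Or.inr h')

lemma ddAux_filter (r : List String) : ∀ (s t : List String),
    ddAux (s ++ t) r = (ddAux t r).filter (fun x => !decide (x ∈ s)) := by
  induction r with
  | nil => intro _ _; simp [ddAux]
  | cons c r ih =>
    intro s t
    simp only [ddAux]
    by_cases ht : c ∈ t
    · rw [if_pos (by simp [ht]), if_pos ht]
      exact ih s t
    · rw [if_neg ht]
      by_cases hs : c ∈ s
      · rw [if_pos (by simp [hs])]
        rw [List.filter_cons, if_neg (by simp [hs])]
        rw [← ih s (t ++ [c])]
        exact ddAux_congr r (s ++ t) (s ++ (t ++ [c])) (fun x _ => by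
          simp only [List.mem_append, List.mem_singleton]
          constructor
          · tauto
          · rintro (h' | h' | h')
            · exact Or.inl h'
            · exact Or.inr h'
            · subst h'; exact Or.inl hs)
      · rw [if_neg (by simp [hs, ht])]
        rw [List.filter_cons, if_pos (by simp [hs])]
        rw [← ih s (t ++ [c]), List.append_assoc]

lemma mem_ddAux (r : List String) : ∀ (seen : List String) (x : String),
    x ∈ ddAux seen r ↔ x ∈ r ∧ x ∉ seen := by
  induction r with
  | nil => intro seen x; simp [ddAux]
  | cons s r ih =>
    intro seen x
    simp only [ddAux]
    by_cases h : s ∈ seen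
    · rw [if_pos h, ih]
      constructor
      · rintro ⟨h1, h2⟩; exact ⟨by simp [h1], h2⟩
      · rintro ⟨h1, h2⟩
        rcases List.mem_cons.mp h1 with h1 | h1
        · subst h1; exact absurd h h2
        · exact ⟨h1, h2⟩
    · rw [if_neg h]
      simp only [List.mem_cons, ih]
      constructor
      · rintro (h1 | ⟨h1, h2⟩)
        · subst h1; exact ⟨Or.inl rfl, h⟩
        · refine ⟨Or.inr h1, fun hx => h2 (by simp [hx])⟩
      · rintro ⟨h1, h2⟩
        by_cases hxs : x = s
        · exact Or.inl hxs
        · rcases h1 with h1 | h1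
          · exact absurd h1 hxs
          · exact Or.inr ⟨h1, fun hx => by
              rcases List.mem_append.mp hx with hx | hx
              · exact h2 hx
              · exact hxs (by simpa using hx)⟩

lemma nodup_ddAux (r : List String) : ∀ (seen : List String), (ddAux seen r).Nodup := by
  induction r with
  | nil => intro seen; simp [ddAux]
  | cons s r ih =>
    intro seen
    simp only [ddAux]
    by_cases h : s ∈ seen
    · rw [if_pos h]; exact ih seen
    · rw [if_neg h]
      refine List.Nodup.cons ?_ (ih (seen ++ [s]))
      intro hmem
      have := (mem_ddAux r (seen ++ [s]) s).mp hmem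
      exact this.2 (by simp)

lemma rec1_eq (M : List String) :
    prioritySkills.foldl (fun acc skill => if skill ∈ M then acc ++ [skill] else acc) []
      = prioritySkills.filter (fun s => decide (s ∈ M)) := by
  have h : (fun (acc : List String) skill => if skill ∈ M then acc ++ [skill] else acc)
      = (fun (acc : List String) skill => if (fun s => decide (s ∈ M)) skill = true then acc ++ [skill] else acc) := by
    funext a s; by_cases h : s ∈ M <;> simp [h]
  rw [h]
  simpa using PySem.List.foldl_append_if (fun s => decide (s ∈ M)) (fun x => x) prioritySkills []

lemma dedup_eq_ddAux (M : List String) : PySem.List.dedup M = ddAux [] M := by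
  rw [PySem.List.dedup_eq_ofList, PySem.Set.ofList_eq_foldl]
  have h : (PySem.Set.add : List String → String → List String)
      = (fun a s => if s ∈ a then a else a ++ [s]) := by
    funext a s; simp [PySem.Set.add, PySem.Set.contains]
  rw [h, foldl_dd]
  simp

lemma rankTable_mk : rankTable = PySem.Dict.mk
    [("python", 0), ("java", 1), ("javascript", 2), ("sql", 3), ("dsa", 4),
     ("machine learning", 5), ("react", 6), ("node", 7), ("docker", 8), ("aws", 9)] := by
  decide

lemma rankOf_eq (s : String) : rankTable.getD s 10 =
    if s = "python" then 0 else if s = "java" then 1 else if s = "javascript" then 2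
    else if s = "sql" then 3 else if s = "dsa" then 4 else if s = "machine learning" then 5
    else if s = "react" then 6 else if s = "node" then 7 else if s = "docker" then 8
    else if s = "aws" then 9 else 10 := by
  by_cases h1 : s = "python"; · subst h1; decide
  by_cases h2 : s = "java"; · subst h2; decide
  by_cases h3 : s = "javascript"; · subst h3; decide
  by_cases h4 : s = "sql"; · subst h4; decide
  by_cases h5 : s = "dsa"; · subst h5; decide
  by_cases h6 : s = "machine learning"; · subst h6; decide
  by_cases h7 : s = "react"; · subst h7; decide
  by_cases h8 : s = "node"; · subst h8; decide
  by_cases h9 : s = "docker"; · subst h9; decide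
  by_cases h10 : s = "aws"; · subst h10; decide
  rw [rankTable_mk, PySem.Dict.getD_eq_get?_getD]
  simp only [PySem.Dict.get?_mk_cons]
  rw [if_neg (by simp; exact fun h => h1 h.symm), if_neg (by simp; exact fun h => h2 h.symm),
      if_neg (by simp; exact fun h => h3 h.symm), if_neg (by simp; exact fun h => h4 h.symm),
      if_neg (by simp; exact fun h => h5 h.symm), if_neg (by simp; exact fun h => h6 h.symm),
      if_neg (by simp; exact fun h => h7 h.symm), if_neg (by simp; exact fun h => h8 h.symm),
      if_neg (by simp; exact fun h => h9 h.symm), if_neg (by simp; exact fun h => h10 h.symm)]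
  simp [h1, h2, h3, h4, h5, h6, h7, h8, h9, h10]
  rfl

def bucketsOf (us : List String) : List (List String) :=
  (List.range 11).map (fun (j : Nat) => us.filter (fun s => decide (rankTable.getD s 10 = (j : Int))))

lemma len_bucketsOf (us : List String) : (bucketsOf us).length = 11 := by simp [bucketsOf]

lemma rank_bounds (s : String) : 0 ≤ rankTable.getD s 10 ∧ rankTable.getD s 10 < 11 := by
  rw [rankOf_eq]; split_ifs <;> norm_num

lemma bucketAppend_bucketsOf (us : List String) (s : String) :
    bucketAppend (bucketsOf us) (rankTable.getD s 10) s = bucketsOf (us ++ [s]) := by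
  obtain ⟨h0, h1⟩ := rank_bounds s
  have hn : rankTable.getD s 10 = (((rankTable.getD s 10).toNat : Nat) : Int) :=
    (Int.toNat_of_nonneg h0).symm
  have hnlt : (rankTable.getD s 10).toNat < 11 := by omega
  rw [bucketAppend, hn, PySem.List.pySetD_natCast, PySem.List.pyGetD_natCast]
  apply List.ext_getElem
  · rw [List.length_set, len_bucketsOf, len_bucketsOf]
  · intro k hk1 hk2
    have hk : k < 11 := by rw [List.length_set, len_bucketsOf] at hk1; exact hk1
    simp only [bucketsOf, List.getElem_set, List.getElem_map, List.getElem_range,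
      List.filter_append]
    by_cases hke : (rankTable.getD s 10).toNat = k
    · rw [if_pos hke]
      rw [List.getD_eq_getElem _ _ (by rw [List.length_map, List.length_range]; exact hnlt)]
      simp only [List.getElem_map, List.getElem_range]
      subst hke
      rw [← hn]
      simp
    · rw [if_neg hke]
      have hne : ¬ (rankTable.getD s 10 = (k : Int)) := by omega
      simp [hne]

lemma foldl_buckets (us : List String) :
    us.foldl (fun bs s => bucketAppend bs (rankTable.getD s 10) s)
        ((List.range 11).map (fun _ => ([] : List String)))
      = bucketsOf us := by
  induction us using List.reverseRecOn with
  | nil => simp [bucketsOf]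
  | append_singleton us s ih =>
    rw [List.foldl_append, List.foldl_cons, List.foldl_nil, ih, bucketAppend_bucketsOf]

lemma filter_eq_lit (U M : List String) (hU2 : U.Nodup) (hU1 : ∀ x, x ∈ U ↔ x ∈ M) (p : String) :
    U.filter (fun s => decide (s = p)) = if p ∈ M then [p] else [] := by
  rw [List.filter_eq]
  by_cases h : p ∈ M
  · rw [if_pos h, List.count_eq_one_of_mem hU2 ((hU1 p).mpr h)]
    rfl
  · rw [if_neg h, List.count_eq_zero.mpr (fun hx => h ((hU1 p).mp hx))]
    rfl

lemma bucket_pred_lit (j : Int) (p : String)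
    (hj : ∀ s : String, rankTable.getD s 10 = j ↔ s = p) :
    (fun s => decide (rankTable.getD s 10 = j)) = (fun s => decide (s = p)) := by
  funext s; simp [hj s]

set_option maxHeartbeats 2000000 in
lemma flat_buckets (M U : List String) (hU2 : U.Nodup) (hU1 : ∀ x, x ∈ U ↔ x ∈ M) :
    (bucketsOf U).flatMap (fun bucket => bucket)
      = prioritySkills.filter (fun s => decide (s ∈ M))
        ++ U.filter (fun x => !decide (x ∈ prioritySkills)) := by
  have hr : (List.range 11) = [0,1,2,3,4,5,6,7,8,9,10] := by decide
  have hb : ∀ (j : Int) (p : String), (∀ s : String, rankTable.getD s 10 = j ↔ s = p) →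
      U.filter (fun s => decide (rankTable.getD s 10 = j)) = if p ∈ M then [p] else [] := by
    intro j p hj
    rw [bucket_pred_lit j p hj, filter_eq_lit U M hU2 hU1]
  have h10 : U.filter (fun s => decide (rankTable.getD s 10 = (10 : Int)))
      = U.filter (fun x => !decide (x ∈ prioritySkills)) := by
    apply List.filter_congr
    intro s _
    rw [rankOf_eq]
    split_ifs <;> simp_all [prioritySkills]
  simp only [bucketsOf, hr, List.map_cons, List.map_nil, List.flatMap_cons, List.flatMap_nil,
    List.append_nil, Nat.cast_ofNat, Nat.cast_zero, Nat.cast_one]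
  rw [hb 0 "python" (fun s => by rw [rankOf_eq]; split_ifs <;> simp_all),
      hb 1 "java" (fun s => by rw [rankOf_eq]; split_ifs <;> simp_all),
      hb 2 "javascript" (fun s => by rw [rankOf_eq]; split_ifs <;> simp_all),
      hb 3 "sql" (fun s => by rw [rankOf_eq]; split_ifs <;> simp_all),
      hb 4 "dsa" (fun s => by rw [rankOf_eq]; split_ifs <;> simp_all),
      hb 5 "machine learning" (fun s => by rw [rankOf_eq]; split_ifs <;> simp_all),
      hb 6 "react" (fun s => by rw [rankOf_eq]; split_ifs <;> simp_all),
      hb 7 "node" (fun s => by rw [rankOf_eq]; split_ifs <;> simp_all),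
      hb 8 "docker" (fun s => by rw [rankOf_eq]; split_ifs <;> simp_all),
      hb 9 "aws" (fun s => by rw [rankOf_eq]; split_ifs <;> simp_all),
      h10]
  have hfc : ∀ (x : String) (xs : List String) (q : String → Bool),
      (x :: xs).filter q = (if q x = true then [x] else []) ++ xs.filter q := by
    intro x xs q; by_cases h : q x <;> simp [h]
  simp only [prioritySkills, hfc, List.filter_nil, decide_eq_true_eq, List.append_assoc,
    List.append_nil]

-- ===== VERDICT (by name: the statement is the Claim_ definition above) =====
theorem recommend_skills_spec : Claim_equal_recommend_skills := by
  intro M _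
  unfold Spec_recommend_skills recommend_skills recommend_skills_alt
  have hlen : (prioritySkills.length : Int) = 10 := by decide
  have hlen' : prioritySkills.length + 1 = 11 := by decide
  simp only [hlen, hlen', dedup_eq_ddAux, foldl_buckets]
  rw [rec1_eq, foldl_dd]
  have hcong : ddAux (prioritySkills.filter (fun s => decide (s ∈ M))) M
      = ddAux prioritySkills M := by
    apply ddAux_congr
    intro x hx
    simp [List.mem_filter, hx]
  have hfilt : ddAux prioritySkills M
      = (ddAux [] M).filter (fun x => !decide (x ∈ prioritySkills)) := by
    have := ddAux_filter M prioritySkills []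
    simpa using this
  rw [hcong, hfilt]
  rw [flat_buckets M (ddAux [] M) (nodup_ddAux M [])
    (fun x => by rw [mem_ddAux]; simp)]
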